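-- pv_equiv track=rewrite | github.com/junyang10734/leetcode-python | Amazon/Highest_Maxium_Profits.py | find_profit
-- ===== SOURCE A (Python) =====
-- def find_profit(N, arr, K):
--     profit = 0
--     while K > 0:
--         if len(arr) > 1:
--             arr.sort(reverse=True)
--             if arr[0] == arr[1]:
--                 K -= 1
--                 profit += arr[0]
--                 arr[0] -= 1
--             else:
--                 diff = arr[0] - arr[1]
--                 if diff <= K:
--                     K -= diff
--                     profit += (arr[0] + arr[1] + 1)*diff//2
--                     arr[0] = arr[1]
--                 else:
--                     profit += (2*arr[0] - K + 1)*K // 2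
--                     K = 0
--         else:
--             profit += (2*arr[0] - K + 1)*K // 2
--             K = 0
--
--     return profit
-- ===== SOURCE B (Python) =====
-- def find_profit(N, arr, K):
--     # Sort once descending, then one linear scan selling whole "levels" with
--     # arithmetic-series sums (no repeated sorting, no per-unit loop).
--     if K <= 0:
--         return 0
--     s = sorted(arr, reverse=True)
--     profit = 0
--     k = K
--     n = len(s)
--     for i in range(n):
--         width = i + 1
--         cur = s[i]
--         target = s[i + 1] if i + 1 < n else None
--         if target is None or (cur - target) * width > k:
--             full, rem = divmod(k, width)
--             profit += width * (cur + (cur - full + 1)) * full // 2 + rem * (cur - full)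
--             break
--         profit += width * (cur + target + 1) * (cur - target) // 2
--         k -= (cur - target) * width
--     return profit
-- ===== Notes on version B (the rewrite author's own statement) =====
-- stated objective: faster
-- what changed: B sorts the list once and does a single linear scan that sells whole price levels with closed-form arithmetic-series sums (divmod for the final partial level), instead of A's while-loop that re-sorts the list and handles only the top two piles (often one unit) per iteration.
import Mathlib
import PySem

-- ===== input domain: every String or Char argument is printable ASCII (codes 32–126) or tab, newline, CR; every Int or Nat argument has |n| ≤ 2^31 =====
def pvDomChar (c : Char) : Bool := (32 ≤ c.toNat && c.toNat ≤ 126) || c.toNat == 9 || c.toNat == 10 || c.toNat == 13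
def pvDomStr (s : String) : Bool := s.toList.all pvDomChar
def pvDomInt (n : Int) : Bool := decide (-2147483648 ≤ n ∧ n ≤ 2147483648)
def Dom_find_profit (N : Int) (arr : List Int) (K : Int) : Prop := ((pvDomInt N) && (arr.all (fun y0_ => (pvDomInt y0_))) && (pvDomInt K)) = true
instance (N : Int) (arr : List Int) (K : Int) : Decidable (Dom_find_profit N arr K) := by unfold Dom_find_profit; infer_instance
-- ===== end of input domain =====

-- B sorts once and sells whole price levels with closed-form series sums, instead of A's
-- per-step re-sorting while-loop (objective: faster). A sorts `arr` in place (a visible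
-- mutation of the caller's list); B does not mutate — the equivalence proved here is about
-- the return value only.

-- ===== PORT A =====
-- A's while-loop, with fuel = K.toNat: the loop body strictly decreases K whenever it
-- continues, so this fuel always suffices and the fuel-0 branch returns the same `profit`
-- the exited while-loop would.
def find_profit_loop (fuel : Nat) (arr : List Int) (K : Int) (profit : Int) : Int :=
  match fuel with
  | 0 => profit
  | fuel + 1 =>
    if 0 < K then
      if 1 < arr.length then
        if PySem.List.pyGetD (PySem.List.sorted arr (fun x => x) true) 0 (0:Int) =
            PySem.List.pyGetD (PySem.List.sorted arr (fun x => x) true) 1 (0:Int) then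
          find_profit_loop fuel
            (PySem.List.pySetD (PySem.List.sorted arr (fun x => x) true) 0
              (PySem.List.pyGetD (PySem.List.sorted arr (fun x => x) true) 0 (0:Int) - 1))
            (K - 1)
            (profit + PySem.List.pyGetD (PySem.List.sorted arr (fun x => x) true) 0 (0:Int))
        else
          if PySem.List.pyGetD (PySem.List.sorted arr (fun x => x) true) 0 (0:Int) -
              PySem.List.pyGetD (PySem.List.sorted arr (fun x => x) true) 1 (0:Int) ≤ K then
            find_profit_loop fuel
              (PySem.List.pySetD (PySem.List.sorted arr (fun x => x) true) 0
                (PySem.List.pyGetD (PySem.List.sorted arr (fun x => x) true) 1 (0:Int)))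
              (K - (PySem.List.pyGetD (PySem.List.sorted arr (fun x => x) true) 0 (0:Int) -
                PySem.List.pyGetD (PySem.List.sorted arr (fun x => x) true) 1 (0:Int)))
              (profit + PySem.Int.floordiv
                ((PySem.List.pyGetD (PySem.List.sorted arr (fun x => x) true) 0 (0:Int) +
                  PySem.List.pyGetD (PySem.List.sorted arr (fun x => x) true) 1 (0:Int) + 1) *
                 (PySem.List.pyGetD (PySem.List.sorted arr (fun x => x) true) 0 (0:Int) -
                  PySem.List.pyGetD (PySem.List.sorted arr (fun x => x) true) 1 (0:Int))) 2)
          else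
            profit + PySem.Int.floordiv
              ((2 * PySem.List.pyGetD (PySem.List.sorted arr (fun x => x) true) 0 (0:Int) - K + 1) * K) 2
      else
        profit + PySem.Int.floordiv ((2 * (PySem.List.pyGetD arr 0 (0:Int)) - K + 1) * K) 2
    else profit

def find_profit (N : Int) (arr : List Int) (K : Int) : Int :=
  find_profit_loop K.toNat arr K 0

-- ===== PORT B =====
-- B's for-loop over the sorted-descending list: at step i, `width` = i+1 piles stand at
-- level `cur` = s[i]; either the budget runs out here (divmod closed form, the break) or
-- all of them are sold down to `target` = s[i+1] (series sum) and the loop advances.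
def find_profit_scan (cur : Int) (rest : List Int) (width k profit : Int) : Int :=
  match rest with
  | [] =>
      profit + PySem.Int.floordiv (width * (cur + (cur - PySem.Int.floordiv k width + 1)) * PySem.Int.floordiv k width) 2
        + PySem.Int.mod k width * (cur - PySem.Int.floordiv k width)
  | target :: rest' =>
      if (cur - target) * width > k then
        profit + PySem.Int.floordiv (width * (cur + (cur - PySem.Int.floordiv k width + 1)) * PySem.Int.floordiv k width) 2
          + PySem.Int.mod k width * (cur - PySem.Int.floordiv k width)
      else
        find_profit_scan target rest' (width + 1) (k - (cur - target) * width)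
          (profit + PySem.Int.floordiv (width * (cur + target + 1) * (cur - target)) 2)

def find_profit_alt (N : Int) (arr : List Int) (K : Int) : Int :=
  if K ≤ 0 then 0
  else
    match PySem.List.sorted arr (fun x => x) true with
    | [] => 0
    | c :: r => find_profit_scan c r 1 K 0

-- ===== PRECONDITION & SPEC =====
-- Pre_ excludes exactly the inputs where the Python A raises IndexError: an empty list with K > 0.
def Pre_find_profit (N : Int) (arr : List Int) (K : Int) : Prop := 0 < K → arr ≠ []
instance (N : Int) (arr : List Int) (K : Int) : Decidable (Pre_find_profit N arr K) := by
  unfold Pre_find_profit; infer_instance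
def pvWitness_find_profit : Int × List Int × Int := (0, [5, 2, 2], 4)

def Spec_find_profit (N : Int) (arr : List Int) (K : Int) (out : Int) : Prop := out = find_profit_alt N arr K
instance (N : Int) (arr : List Int) (K : Int) (out : Int) : Decidable (Spec_find_profit N arr K out) := by unfold Spec_find_profit; infer_instance

-- ===== CLAIM (what is proved, stated in full; the proofs are below) =====
def Claim_equal_find_profit : Prop := ∀ (N : Int) (arr : List Int) (K : Int), Dom_find_profit N arr K → Pre_find_profit N arr K → Spec_find_profit N arr K (find_profit N arr K)

-- ===== LEMMAS AND PROOFS =====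

-- the reference greedy: sell one unit at a time, always from a currently-maximal pile
def pvV (l : List Int) (k : Nat) : Int :=
  match k with
  | 0 => 0
  | k + 1 =>
    match l.max? with
    | none => 0
    | some M => M + pvV ((M - 1) :: l.erase M) k

theorem pv_max_head (a : Int) (r : List Int) (h : ∀ x ∈ r, x ≤ a) : (a :: r).max? = some a :=
  List.max?_eq_some_iff.mpr ⟨by simp, by simpa using h⟩

theorem pv_max_perm {l l' : List Int} (M : Int) (h : l.Perm l') (hm : l.max? = some M) :
    l'.max? = some M := by
  rw [List.max?_eq_some_iff] at *
  exact ⟨h.mem_iff.mp hm.1, fun b hb => hm.2 b (h.mem_iff.mpr hb)⟩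

theorem pvV_perm (k : Nat) : ∀ {l l' : List Int}, l.Perm l' → pvV l k = pvV l' k := by
  induction k with
  | zero => intro l l' _; rfl
  | succ k IH =>
    intro l l' h
    cases hm : l.max? with
    | none =>
      have hl : l = [] := by simpa using hm
      have hl' : l' = [] := by simpa [hl] using h.symm
      simp [pvV, hl, hl']
    | some M =>
      have hm' : l'.max? = some M := pv_max_perm M h hm
      simp only [pvV, hm, hm']
      rw [IH ((h.erase M).cons (M - 1))]

theorem pv_half (x y : Int) (h : 2 * y = x) : PySem.Int.floordiv x 2 = y := by
  rw [PySem.Int.floordiv_eq_ediv_of_pos (by norm_num)]; omega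

-- the whole budget is spent on the top pile (all other piles stay strictly below it)
theorem pv_topRun (k : Nat) : ∀ (a : Int) (r : List Int), (∀ x ∈ r, x ≤ a - k) →
    2 * pvV (a :: r) k = (2 * a - k + 1) * k := by
  induction k with
  | zero => intro a r _; simp [pvV]
  | succ k IH =>
    intro a r h
    have hle : ∀ x ∈ r, x ≤ a := by
      intro x hx; have := h x hx; push_cast at this ⊢; omega
    have hmax := pv_max_head a r hle
    simp only [pvV, hmax, List.erase_cons_head]
    have hIH := IH (a - 1) r (by intro x hx; have := h x hx; push_cast at this ⊢; omega)
    push_cast at hIH ⊢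
    linear_combination hIH

-- A's batched step: bring the top pile from a down to b, collecting the series sum
theorem pv_drop (d : Nat) : ∀ (a b : Int) (t : List Int) (k : Nat), a - b = (d : Int) → b < a →
    (∀ x ∈ t, x ≤ b) → d ≤ k →
    pvV (a :: b :: t) k =
      PySem.Int.floordiv ((a + b + 1) * (a - b)) 2 + pvV (b :: b :: t) (k - d) := by
  induction d with
  | zero => intro a b t k hd hba _ _; omega
  | succ d IH =>
    intro a b t k hd hba ht hk
    obtain ⟨k', rfl⟩ : ∃ k', k = k' + 1 := ⟨k - 1, by omega⟩
    have hle : ∀ x ∈ b :: t, x ≤ a := by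
      intro x hx; rcases List.mem_cons.mp hx with rfl | hx
      · omega
      · exact le_trans (ht x hx) (le_of_lt hba)
    have hmax := pv_max_head a (b :: t) hle
    simp only [pvV, hmax, List.erase_cons_head]
    by_cases hd0 : d = 0
    · subst hd0
      have hab : a = b + 1 := by push_cast at hd; omega
      have h2 : PySem.Int.floordiv ((a + b + 1) * (a - b)) 2 = a := pv_half _ _ (by rw [hab]; ring)
      rw [hab] at *
      simp only [show b + 1 - 1 = b from by ring, h2]
      rw [show k' + 1 - (0 + 1) = k' from by omega]
    · have hIH := IH (a - 1) b t k' (by push_cast at hd ⊢; omega) (by push_cast at hd; omega)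
        ht (by omega)
      rw [hIH]
      have hev1 : 2 ∣ (a - 1 + b + 1) * (a - 1 - b) := by
        have he : Even ((a - 1 + b + 1) * (a - 1 - b)) := by
          rw [Int.even_mul, Int.even_iff, Int.even_iff]; omega
        exact he.two_dvd
      have hev2 : 2 ∣ (a + b + 1) * (a - b) := by
        have he : Even ((a + b + 1) * (a - b)) := by
          rw [Int.even_mul, Int.even_iff, Int.even_iff]; omega
        exact he.two_dvd
      obtain ⟨u, hu⟩ := hev1
      obtain ⟨v, hv⟩ := hev2
      rw [hu, hv, pv_half _ _ rfl, pv_half _ _ rfl]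
      have hqp : (a + b + 1) * (a - b) = (a - 1 + b + 1) * (a - 1 - b) + 2 * a := by ring
      have hk' : k' + 1 - (d + 1) = k' - d := by omega
      rw [hk']
      omega

theorem pv_repl_shift (w : Nat) (t : Int) (r : List Int) :
    List.replicate w t ++ t :: r = List.replicate (w + 1) t ++ r := by
  rw [List.replicate_succ']; simp

-- sell one full row: w piles at level L each lose one unit
theorem pv_row (w : Nat) : ∀ (L : Int) (rest : List Int) (k : Nat), (∀ x ∈ rest, x ≤ L - 1) →
    w ≤ k →
    pvV (List.replicate w L ++ rest) k =
      w * L + pvV (List.replicate w (L - 1) ++ rest) (k - w) := by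
  induction w with
  | zero => intro L rest k _ _; simp
  | succ w IH =>
    intro L rest k hrest hk
    obtain ⟨k', rfl⟩ : ∃ k', k = k' + 1 := ⟨k - 1, by omega⟩
    have hle : ∀ x ∈ List.replicate w L ++ rest, x ≤ L := by
      intro x hx
      rcases List.mem_append.mp hx with hx | hx
      · rw [List.eq_of_mem_replicate hx]
      · exact le_trans (hrest x hx) (by omega)
    rw [List.replicate_succ, List.cons_append]
    simp only [pvV, pv_max_head L _ hle, List.erase_cons_head]
    rw [pvV_perm k' (List.perm_middle.symm)]
    have hIH := IH L ((L - 1) :: rest) k'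
      (by intro x hx
          rcases List.mem_cons.mp hx with rfl | hx
          · omega
          · exact hrest x hx)
      (by omega)
    rw [hIH, pv_repl_shift]
    have : k' + 1 - (w + 1) = k' - w := by omega
    rw [this]
    push_cast
    ring

-- spend a budget r smaller than the row width: r units at level L
theorem pv_partial (r : Nat) : ∀ (w : Nat) (L : Int) (rest : List Int), r ≤ w →
    (∀ x ∈ rest, x ≤ L - 1) → pvV (List.replicate w L ++ rest) r = r * L := by
  induction r with
  | zero => intro w L rest _ _; simp [pvV]
  | succ r IH =>
    intro w L rest hw hrest
    obtain ⟨w', rfl⟩ : ∃ w', w = w' + 1 := ⟨w - 1, by omega⟩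
    have hle : ∀ x ∈ List.replicate w' L ++ rest, x ≤ L := by
      intro x hx
      rcases List.mem_append.mp hx with hx | hx
      · rw [List.eq_of_mem_replicate hx]
      · exact le_trans (hrest x hx) (by omega)
    rw [List.replicate_succ, List.cons_append]
    simp only [pvV, pv_max_head L _ hle, List.erase_cons_head]
    rw [pvV_perm r (List.perm_middle.symm)]
    rw [IH w' L ((L - 1) :: rest) (by omega)
      (by intro x hx
          rcases List.mem_cons.mp hx with rfl | hx
          · omega
          · exact hrest x hx)]
    push_cast
    ring

-- descend w piles from level L by d rows
theorem pv_level (d : Nat) : ∀ (w : Nat) (L : Int) (rest : List Int) (k : Nat), 0 < w →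
    (∀ x ∈ rest, x ≤ L - d) → d * w ≤ k →
    2 * pvV (List.replicate w L ++ rest) k =
      (w : Int) * (L + (L - d) + 1) * d + 2 * pvV (List.replicate w (L - d) ++ rest) (k - d * w) := by
  induction d with
  | zero => intro w L rest k _ _ _; simp
  | succ d IH =>
    intro w L rest k hw hrest hk
    have hk' : w ≤ k := by
      have : (d + 1) * w = d * w + w := by ring
      omega
    rw [pv_row w L rest k (by intro x hx; have := hrest x hx; push_cast at this ⊢; omega) hk']
    have hIH := IH w (L - 1) rest (k - w) hw
      (by intro x hx; have := hrest x hx; push_cast at this ⊢; omega)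
      (by have hh : (d + 1) * w = d * w + w := by ring
          omega)
    have hsub : k - w - d * w = k - (d + 1) * w := by
      have : (d + 1) * w = d * w + w := by ring
      omega
    rw [hsub] at hIH
    have hLd : L - 1 - (d : Int) = L - ((d : Nat) + 1 : Nat) := by push_cast; ring
    rw [hLd] at hIH
    push_cast at hIH ⊢
    linear_combination hIH

-- the closed-form "spend the rest of the budget on the top pile" value matches pvV
theorem pv_topHalf (a K : Int) (r : List Int) (hK : 0 < K) (hr : ∀ x ∈ r, x ≤ a - K) :
    PySem.Int.floordiv ((2 * a - K + 1) * K) 2 = pvV (a :: r) K.toNat := by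
  have hcast : ((K.toNat : Int)) = K := Int.toNat_of_nonneg (by omega)
  have htr := pv_topRun K.toNat a r (by
    intro x hx
    rw [hcast]
    exact hr x hx)
  rw [hcast] at htr
  exact pv_half _ _ htr

-- A's loop computes profit + pvV of the current state
theorem pv_loopA : ∀ (fuel : Nat) (arr : List Int) (K profit : Int), arr ≠ [] → K.toNat ≤ fuel →
    find_profit_loop fuel arr K profit = profit + pvV arr K.toNat := by
  intro fuel
  induction fuel with
  | zero =>
    intro arr K profit _ hf
    have h0 : K.toNat = 0 := by omega
    simp [find_profit_loop, h0, pvV]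
  | succ fuel IH =>
    intro arr K profit hne hf
    by_cases hK : 0 < K
    · by_cases hL : 1 < arr.length
      · -- two or more piles: sort, look at the top two
        have hsp : (PySem.List.sorted arr (fun x => x) true).Perm arr :=
          PySem.List.sorted_perm arr (fun x => x) true
        have hslen : 1 < (PySem.List.sorted arr (fun x => x) true).length := by
          rw [hsp.length_eq]; exact hL
        obtain ⟨a0, a1, t, hst⟩ : ∃ a0 a1 t,
            PySem.List.sorted arr (fun x => x) true = a0 :: a1 :: t := by
          rcases hlst : PySem.List.sorted arr (fun x => x) true with _ | ⟨x, _ | ⟨y, u⟩⟩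
          · rw [hlst] at hslen; simp at hslen
          · rw [hlst] at hslen; simp at hslen
          · exact ⟨x, y, u, rfl⟩
        have hpair : (a0 :: a1 :: t).Pairwise (fun a b => b ≤ a) := by
          have hp := PySem.List.sorted_pairwise_rev (xs := arr) (key := fun x => x)
          rw [hst] at hp
          simpa using hp
        have h10 : a1 ≤ a0 := (List.pairwise_cons.mp hpair).1 a1 (by simp)
        have htle : ∀ x ∈ t, x ≤ a1 :=
          (List.pairwise_cons.mp (List.pairwise_cons.mp hpair).2).1
        have hg0 : PySem.List.pyGetD (PySem.List.sorted arr (fun x => x) true) 0 (0:Int) = a0 := by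
          rw [hst]; simp [pysem]
        have hg1 : PySem.List.pyGetD (PySem.List.sorted arr (fun x => x) true) 1 (0:Int) = a1 := by
          rw [hst]; simp [pysem]
        have hperm : pvV arr K.toNat = pvV (a0 :: a1 :: t) K.toNat := by
          rw [← hst]; exact (pvV_perm _ hsp).symm
        simp only [find_profit_loop, if_pos hK, if_pos hL, hg0, hg1]
        by_cases heq : a0 = a1
        · rw [if_pos heq]
          have hset : PySem.List.pySetD (PySem.List.sorted arr (fun x => x) true) 0 (a0 - 1) =
              (a0 - 1) :: a1 :: t := by
            rw [hst]
            simp [pysem]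
          rw [hset, IH _ _ _ (by simp) (by omega), hperm]
          obtain ⟨n, hn⟩ : ∃ n, K.toNat = n + 1 := ⟨K.toNat - 1, by omega⟩
          have hmax : (a0 :: a1 :: t).max? = some a0 := by
            apply pv_max_head
            intro x hx
            rcases List.mem_cons.mp hx with rfl | hx
            · omega
            · exact le_trans (htle x hx) h10
          rw [hn]
          simp only [pvV, hmax, List.erase_cons_head]
          rw [show (K - 1).toNat = n from by omega]
          ring
        · rw [if_neg heq]
          have h10' : a1 < a0 := lt_of_le_of_ne h10 (fun h => heq h.symm)
          by_cases hd : a0 - a1 ≤ K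
          · rw [if_pos hd]
            have hset : PySem.List.pySetD (PySem.List.sorted arr (fun x => x) true) 0 a1 =
                a1 :: a1 :: t := by
              rw [hst]
              simp [pysem]
            rw [hset, IH _ _ _ (by simp) (by omega), hperm]
            have hdrop := pv_drop (a0 - a1).toNat a0 a1 t K.toNat
              (Int.toNat_of_nonneg (by omega)).symm h10' htle (by omega)
            rw [hdrop, show (K - (a0 - a1)).toNat = K.toNat - (a0 - a1).toNat from by omega]
            ring
          · rw [if_neg hd]
            rw [hperm, pv_topHalf a0 K (a1 :: t) hK (by
              intro x hx
              rcases List.mem_cons.mp hx with rfl | hx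
              · omega
              · have := htle x hx; omega)]
      · -- a single pile
        obtain ⟨a, rfl⟩ : ∃ a, arr = [a] := by
          rcases arr with _ | ⟨x, _ | ⟨y, u⟩⟩
          · exact absurd rfl hne
          · exact ⟨x, rfl⟩
          · simp at hL
        simp only [find_profit_loop, if_pos hK, if_neg hL]
        have hg : PySem.List.pyGetD [a] 0 (0:Int) = a := by simp [pysem]
        rw [hg, pv_topHalf a K [] hK (by simp)]
    · have h0 : K.toNat = 0 := by omega
      simp [find_profit_loop, hK, h0, pvV]

-- the "break" of B's loop: the remaining budget k is spent on the w piles at level cur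
-- (every later pile stays strictly below the final level cur - k//w)
theorem pv_break (cur : Int) (w : Nat) (k : Int) (rest : List Int) (hw : 0 < w) (hk : 0 ≤ k)
    (hrest : ∀ x ∈ rest, x < cur - PySem.Int.floordiv k (w : Int)) :
    PySem.Int.floordiv ((w : Int) * (cur + (cur - PySem.Int.floordiv k (w : Int) + 1)) *
        PySem.Int.floordiv k (w : Int)) 2 +
      PySem.Int.mod k (w : Int) * (cur - PySem.Int.floordiv k (w : Int)) =
    pvV (List.replicate w cur ++ rest) k.toNat := by
  have hwpos : (0 : Int) < (w : Int) := by exact_mod_cast hw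
  have hfr := PySem.Int.floordiv_mul_add_mod k (w : Int)
  have hr0 : 0 ≤ PySem.Int.mod k (w : Int) := PySem.Int.mod_nonneg k hwpos
  have hrw : PySem.Int.mod k (w : Int) < (w : Int) := PySem.Int.mod_lt k hwpos
  have hf0 : 0 ≤ PySem.Int.floordiv k (w : Int) := by
    by_contra hcon
    push_neg at hcon
    have h1 : PySem.Int.floordiv k (w : Int) * (w : Int) ≤ (-1) * (w : Int) :=
      mul_le_mul_of_nonneg_right (by omega) (by omega)
    nlinarith
  have hcast : ((PySem.Int.floordiv k (w : Int)).toNat : Int) = PySem.Int.floordiv k (w : Int) :=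
    Int.toNat_of_nonneg hf0
  have hprodc : (((PySem.Int.floordiv k (w : Int)).toNat * w : Nat) : Int) =
      PySem.Int.floordiv k (w : Int) * (w : Int) := by push_cast [hcast]; ring
  have hdw : (PySem.Int.floordiv k (w : Int)).toNat * w ≤ k.toNat := by
    generalize hz : PySem.Int.floordiv k (w : Int) * (w : Int) = z at hfr hprodc
    omega
  have hlev := pv_level (PySem.Int.floordiv k (w : Int)).toNat w cur rest k.toNat hw
    (by
      intro x hx
      have := hrest x hx
      rw [hcast]
      omega) hdw
  rw [hcast] at hlev
  have hremN : k.toNat - (PySem.Int.floordiv k (w : Int)).toNat * w =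
      (PySem.Int.mod k (w : Int)).toNat := by
    generalize hz : PySem.Int.floordiv k (w : Int) * (w : Int) = z at hfr hprodc
    omega
  have hpart := pv_partial (k.toNat - (PySem.Int.floordiv k (w : Int)).toNat * w) w
    (cur - PySem.Int.floordiv k (w : Int)) rest
    (by
      generalize hz : PySem.Int.floordiv k (w : Int) * (w : Int) = z at hfr hprodc
      omega)
    (by
      intro x hx
      have := hrest x hx
      omega)
  rw [hpart] at hlev
  have hremc : ((k.toNat - (PySem.Int.floordiv k (w : Int)).toNat * w : Nat) : Int) =
      PySem.Int.mod k (w : Int) := by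
    rw [hremN]
    exact Int.toNat_of_nonneg hr0
  rw [hremc] at hlev
  have hhalf := pv_half
    ((w : Int) * (cur + (cur - PySem.Int.floordiv k (w : Int) + 1)) * PySem.Int.floordiv k (w : Int))
    (pvV (List.replicate w cur ++ rest) k.toNat -
      PySem.Int.mod k (w : Int) * (cur - PySem.Int.floordiv k (w : Int)))
    (by linear_combination hlev)
  rw [hhalf]
  ring

-- B's scan computes profit + pvV of the virtual state
theorem pv_scanB : ∀ (rest : List Int) (cur : Int) (w : Nat) (k profit : Int), 0 < w → 0 ≤ k →
    (∀ x ∈ rest, x ≤ cur) → rest.Pairwise (fun a b => b ≤ a) →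
    find_profit_scan cur rest (w : Int) k profit =
      profit + pvV (List.replicate w cur ++ rest) k.toNat := by
  intro rest
  induction rest with
  | nil =>
    intro cur w k profit hw hk _ _
    simp only [find_profit_scan]
    rw [add_assoc, pv_break cur w k [] hw hk (by simp)]
  | cons target rest' IH =>
    intro cur w k profit hw hk hall hpair
    have hwpos : (0 : Int) < (w : Int) := by exact_mod_cast hw
    have htc : target ≤ cur := hall target (by simp)
    have hrt : ∀ x ∈ rest', x ≤ target := (List.pairwise_cons.mp hpair).1
    simp only [find_profit_scan]
    by_cases hbr : (cur - target) * (w : Int) > k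
    · rw [if_pos hbr]
      have hflt : PySem.Int.floordiv k (w : Int) < cur - target := by
        rw [PySem.Int.floordiv_lt_iff_lt_mul hwpos]
        linarith
      rw [add_assoc, pv_break cur w k (target :: rest') hw hk (by
        intro x hx
        rcases List.mem_cons.mp hx with rfl | hx
        · omega
        · have := hrt x hx; omega)]
    · rw [if_neg hbr]
      push_neg at hbr
      have hk' : 0 ≤ k - (cur - target) * (w : Int) := by linarith
      have hdc : (((cur - target).toNat : Int)) = cur - target := Int.toNat_of_nonneg (by omega)
      have hprodc : (((cur - target).toNat * w : Nat) : Int) = (cur - target) * (w : Int) := by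
        push_cast [hdc]; ring
      have hdw : (cur - target).toNat * w ≤ k.toNat := by
        generalize hz : (cur - target) * (w : Int) = z at hbr hprodc
        omega
      have hlev := pv_level (cur - target).toNat w cur (target :: rest') k.toNat hw
        (by
          intro x hx
          rw [hdc]
          rcases List.mem_cons.mp hx with rfl | hx
          · omega
          · have := hrt x hx; omega) hdw
      rw [hdc, show cur - (cur - target) = target from by ring, pv_repl_shift] at hlev
      have hIH := IH target (w + 1) (k - (cur - target) * (w : Int))
        (profit + PySem.Int.floordiv ((w : Int) * (cur + target + 1) * (cur - target)) 2)
        (by omega) hk' hrt (List.pairwise_cons.mp hpair).2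
      push_cast at hIH
      rw [hIH]
      have hkk : (k - (cur - target) * (w : Int)).toNat = k.toNat - (cur - target).toNat * w := by
        generalize hz : (cur - target) * (w : Int) = z at hbr hprodc hk'
        omega
      rw [hkk]
      have hhalf := pv_half ((w : Int) * (cur + target + 1) * (cur - target))
        (pvV (List.replicate w cur ++ target :: rest') k.toNat -
          pvV (List.replicate (w + 1) target ++ rest') (k.toNat - (cur - target).toNat * w))
        (by linear_combination hlev)
      rw [hhalf]
      ring

-- ===== VERDICT (by name: the statement is the Claim_ definition above) =====
theorem find_profit_spec : Claim_equal_find_profit := by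
  intro N arr K _ hpre
  unfold Spec_find_profit find_profit find_profit_alt
  by_cases hK : K ≤ 0
  · rw [if_pos hK]
    rw [show K.toNat = 0 from by omega]
    rfl
  · rw [if_neg hK]
    have hne : arr ≠ [] := hpre (by omega)
    rcases hs : PySem.List.sorted arr (fun x => x) true with _ | ⟨c, r⟩
    · have hp := PySem.List.sorted_perm arr (fun x => x) true
      rw [hs] at hp
      exact absurd hp.symm.eq_nil hne
    · have hpair : (c :: r).Pairwise (fun a b => b ≤ a) := by
        have hp := PySem.List.sorted_pairwise_rev (xs := arr) (key := fun x => x)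
        rw [hs] at hp
        simpa using hp
      have hsc := pv_scanB r c 1 K 0 (by omega) (by omega)
        (List.pairwise_cons.mp hpair).1 (List.pairwise_cons.mp hpair).2
      push_cast at hsc
      show find_profit_loop K.toNat arr K 0 = find_profit_scan c r 1 K 0
      rw [hsc]
      rw [pv_loopA K.toNat arr K 0 hne le_rfl]
      have hperm : pvV arr K.toNat = pvV (c :: r) K.toNat := by
        have hsp : (PySem.List.sorted arr (fun x => x) true).Perm arr :=
          PySem.List.sorted_perm arr (fun x => x) true
        rw [hs] at hsp
        exact (pvV_perm _ hsp).symm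
      rw [hperm]
      simp
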